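-- pv_equiv track=rewrite | github.com/romanebarra/MVA-Kernel-Methods | vocab.py | create_kmer_dict
-- ===== SOURCE A (Python) =====
-- def create_kmer_dict(sequences, k):
--     """
--     Parameters:
--         sequences : list of the DNA sequences
--         k: length of the substrings to extract
--
--     Returns:
--         kmer_set: the dictionnary that maps k-substrings to indices
--     """
--     kmer_dict = {}
--     index = 0
--     for seq in sequences:
--         for i in range(len(seq) - k + 1): # stop when there is less than k characters left
--             kmer = seq[i:i+k] # the substring is the sequence between i and i+k
--             if kmer not in kmer_dict:
--                 kmer_dict[kmer] = index # whenever we encounter a new k-substring, we add it to the dictionnary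
--                 index += 1
--     return kmer_dict
-- ===== SOURCE B (Python) =====
-- def create_kmer_dict(sequences, k):
--     flat = [seq[i:i+k] for seq in sequences for i in range(len(seq) - k + 1)]
--     first = {}
--     for p, kmer in reversed(list(enumerate(flat))):
--         first[kmer] = p
--     order = sorted(first.items(), key=lambda kv: kv[1])
--     return {kmer: r for r, (kmer, _) in enumerate(order)}
-- ===== Notes on version B (the rewrite author's own statement) =====
-- stated objective: alternative
-- what changed: Replaces A's single left-to-right pass that maintains a membership-checked dict and a running counter by a rank-compression pipeline: materialize all k-mers, record each k-mer's first flat position by overwriting a dict in a reverse scan (no membership test), sort the distinct k-mers by first position, and rank them by enumerate.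
import Mathlib
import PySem

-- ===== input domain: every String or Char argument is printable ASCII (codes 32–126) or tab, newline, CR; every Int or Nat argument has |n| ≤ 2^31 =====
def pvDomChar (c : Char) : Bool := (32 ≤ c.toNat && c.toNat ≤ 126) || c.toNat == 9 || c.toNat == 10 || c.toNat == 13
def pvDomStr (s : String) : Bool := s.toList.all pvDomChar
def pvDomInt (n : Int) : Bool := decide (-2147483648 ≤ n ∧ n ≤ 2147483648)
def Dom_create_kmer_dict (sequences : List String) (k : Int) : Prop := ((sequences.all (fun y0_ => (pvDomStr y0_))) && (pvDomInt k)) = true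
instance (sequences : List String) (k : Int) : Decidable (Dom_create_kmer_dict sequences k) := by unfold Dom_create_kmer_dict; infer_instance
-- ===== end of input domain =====

-- B replaces A's single-pass membership-checked dict with a running counter by a rank-compression
-- pipeline: materialize all k-mers, record first flat positions by overwriting in a reverse scan,
-- sort the distinct k-mers by first position, rank by enumerate; objective: alternative.

-- ===== PORT A =====
def create_kmer_dict (sequences : List String) (k : Int) : List (String × Int) :=
  (sequences.foldl
      (fun (st : PySem.Dict String Int × Int) seq =>
        (PySem.List.pyRange 0 (PySem.Str.len seq - k + 1) 1).foldl
          (fun st i =>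
            let kmer := PySem.Str.slice seq (some i) (some (i + k))
            if st.1.contains kmer then st
            else (st.1.insert kmer st.2, st.2 + 1))
          st)
      (PySem.Dict.empty, 0)).1.items

-- ===== PORT B =====
def create_kmer_dict_alt (sequences : List String) (k : Int) : List (String × Int) :=
  let flat := sequences.flatMap (fun seq =>
    (PySem.List.pyRange 0 (PySem.Str.len seq - k + 1) 1).map
      (fun i => PySem.Str.slice seq (some i) (some (i + k))))
  let first := ((PySem.List.enumerate flat 0).reverse).foldl
      (fun (d : PySem.Dict String Int) pr => d.insert pr.2 pr.1) PySem.Dict.empty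
  let order := PySem.List.sorted first.items (fun kv => kv.2)
  (PySem.List.enumerate order 0).map (fun p => (p.2.1, p.1))

-- ===== PRECONDITION & SPEC =====
def Spec_create_kmer_dict (sequences : List String) (k : Int) (out : List (String × Int)) : Prop := out = create_kmer_dict_alt sequences k
instance (sequences : List String) (k : Int) (out : List (String × Int)) : Decidable (Spec_create_kmer_dict sequences k out) := by unfold Spec_create_kmer_dict; infer_instance

-- ===== CLAIM (what is proved, stated in full; the proofs are below) =====
def Claim_equal_create_kmer_dict : Prop := ∀ (sequences : List String) (k : Int), Dom_create_kmer_dict sequences k → Spec_create_kmer_dict sequences k (create_kmer_dict sequences k)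

-- ===== LEMMAS AND PROOFS =====

-- A-SIDE. The dict A has built after registering exactly the distinct kmers S (in order):
-- keys S, values 0..|S|-1.
def pvMkD (S : List String) : PySem.Dict String Int :=
  PySem.Dict.mk ((PySem.List.enumerate S 0).map (fun p => (p.2, p.1)))

theorem pvEnumAny (S : List String) (s : Int) (x : String) :
    ((PySem.List.enumerate S s).any (fun p => p.2 == x)) = decide (x ∈ S) := by
  induction S generalizing s with
  | nil => rfl
  | cons a t ih =>
    simp only [PySem.List.enumerate_cons, List.any_cons, ih, List.mem_cons]
    by_cases h : a = x
    · simp [h]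
    · have h2 : ¬ x = a := fun hh => h hh.symm
      simp [h, h2]

theorem pvMkD_contains (S : List String) (x : String) :
    (pvMkD S).contains x = decide (x ∈ S) := by
  simp only [pvMkD, PySem.Dict.contains, List.any_map]
  exact pvEnumAny S 0 x

theorem pvMkD_add (S : List String) (x : String) (h : x ∉ S) :
    (pvMkD S).insert x (S.length : Int) = pvMkD (S ++ [x]) := by
  apply PySem.Dict.ext
  rw [PySem.Dict.items_insert_of_not_contains _ _ (by rw [pvMkD_contains]; simpa using h)]
  simp [pvMkD, PySem.List.enumerate_append]

-- One step of A's loop body, on a state of the invariant shape, is Set.add on the seen list.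
theorem pvStep (S : List String) (x : String) :
    (if (pvMkD S).contains x then (pvMkD S, (S.length : Int))
     else ((pvMkD S).insert x S.length, (S.length : Int) + 1))
    = (pvMkD (PySem.Set.add S x), ((PySem.Set.add S x).length : Int)) := by
  rw [pvMkD_contains]
  by_cases hm : x ∈ S
  · simp only [PySem.Set.add, PySem.Set.contains]
    simp [hm]
  · rw [pvMkD_add S x hm]
    simp only [PySem.Set.add, PySem.Set.contains]
    simp [hm]

-- A's fold over a flat kmer stream preserves the invariant.
theorem pvFold (ks : List String) (S : List String) :
    ks.foldl
      (fun (st : PySem.Dict String Int × Int) kmer =>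
        if st.1.contains kmer then st else (st.1.insert kmer st.2, st.2 + 1))
      (pvMkD S, (S.length : Int))
    = (pvMkD (ks.foldl PySem.Set.add S), ((ks.foldl PySem.Set.add S).length : Int)) := by
  induction ks generalizing S with
  | nil => rfl
  | cons x t ih =>
    simp only [List.foldl_cons]
    rw [show (if (pvMkD S).contains x then (pvMkD S, (S.length : Int))
        else ((pvMkD S).insert x S.length, (S.length : Int) + 1))
        = (pvMkD (PySem.Set.add S x), ((PySem.Set.add S x).length : Int)) from pvStep S x]
    exact ih (PySem.Set.add S x)

-- B-SIDE. The reverse-scan overwrite dict maps each kmer to its FIRST position in the stream.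
theorem pvIdxOfCons (x y : String) (t : List String) (h : ¬ x = y) :
    List.idxOf y (x :: t) = List.idxOf y t + 1 := by
  have hb : (x == y) = false := by simpa using h
  simp [List.idxOf_cons, hb]

theorem pvGetFoldr (flat : List String) (s : Int) (km : String) :
    ((PySem.List.enumerate flat s).foldr
        (fun (pr : Int × String) (d : PySem.Dict String Int) => d.insert pr.2 pr.1)
        PySem.Dict.empty).get? km
    = if km ∈ flat then some (s + (flat.idxOf km : Int)) else none := by
  induction flat generalizing s with
  | nil => simp [PySem.List.enumerate]
  | cons x t ih =>
    simp only [PySem.List.enumerate_cons, List.foldr_cons]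
    by_cases hx : x = km
    · subst hx
      rw [PySem.Dict.get?_insert_self]
      simp
    · rw [PySem.Dict.get?_insert_of_ne _ _ (fun h => hx h.symm), ih (s + 1)]
      have hidx : List.idxOf km (x :: t) = List.idxOf km t + 1 := pvIdxOfCons x km t hx
      by_cases hm : km ∈ t
      · simp only [hm, if_true, List.mem_cons, hidx]
        have : ¬ km = x := fun h => hx h.symm
        simp only [this, false_or, if_true]
        congr 1
        push_cast
        ring
      · have hkx : ¬ km = x := fun h => hx h.symm
        have : ¬ km ∈ x :: t := by simp [List.mem_cons, hm, hkx]
        simp [hm, this]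

theorem pvNodupKeysFoldr (L : List (Int × String)) :
    (L.foldr (fun (pr : Int × String) (d : PySem.Dict String Int) => d.insert pr.2 pr.1)
        PySem.Dict.empty).keys.Nodup := by
  induction L with
  | nil => simp [PySem.Dict.empty, PySem.Dict.keys]
  | cons pr t ih => exact PySem.Dict.nodup_keys_insert _ _ _ ih

-- dedup order is first-occurrence order: indices of first occurrences strictly increase.
theorem pvIdxPairwise (flat : List String) :
    (PySem.Set.ofList flat).Pairwise (fun a b => flat.idxOf a < flat.idxOf b) := by
  induction flat with
  | nil => simp [PySem.Set.ofList]
  | cons x t ih =>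
    rw [PySem.Set.ofList_cons]
    refine List.pairwise_cons.mpr ⟨?_, ?_⟩
    · intro y hy
      obtain ⟨-, hyx⟩ := (PySem.Set.mem_discard _ _ _).mp hy
      have h1 : List.idxOf x (x :: t) = 0 := by simp
      have h2 : List.idxOf y (x :: t) = List.idxOf y t + 1 :=
        pvIdxOfCons x y t (fun h => hyx h.symm)
      omega
    · have hsub : (PySem.Set.discard (PySem.Set.ofList t) x).Sublist (PySem.Set.ofList t) :=
        List.filter_sublist
      have hp := List.Pairwise.sublist hsub ih
      refine List.Pairwise.imp_of_mem ?_ hp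
      intro a b ha hb hab
      obtain ⟨-, hax⟩ := (PySem.Set.mem_discard _ _ _).mp ha
      obtain ⟨-, hbx⟩ := (PySem.Set.mem_discard _ _ _).mp hb
      have h1 : List.idxOf a (x :: t) = List.idxOf a t + 1 :=
        pvIdxOfCons x a t (fun h => hax h.symm)
      have h2 : List.idxOf b (x :: t) = List.idxOf b t + 1 :=
        pvIdxOfCons x b t (fun h => hbx h.symm)
      omega

-- enumerating a keyed copy and projecting back equals enumerating the keys.
theorem pvEnumMap (l : List String) (f : String → Int) (s : Int) :
    (PySem.List.enumerate (l.map (fun km => (km, f km))) s).map (fun p => (p.2.1, p.1))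
    = (PySem.List.enumerate l s).map (fun p => (p.2, p.1)) := by
  induction l generalizing s with
  | nil => rfl
  | cons x t ih => simp [PySem.List.enumerate_cons, ih]

-- the sorted first-position items are exactly the distinct kmers, in first-occurrence order.
theorem pvSorted (flat : List String) :
    PySem.List.sorted
      (((PySem.List.enumerate flat 0).foldr
          (fun (pr : Int × String) (d : PySem.Dict String Int) => d.insert pr.2 pr.1)
          PySem.Dict.empty).items)
      (fun kv => kv.2)
    = (PySem.Set.ofList flat).map (fun km => (km, (flat.idxOf km : Int))) := by
  set d := (PySem.List.enumerate flat 0).foldr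
      (fun (pr : Int × String) (d : PySem.Dict String Int) => d.insert pr.2 pr.1)
      PySem.Dict.empty with hd
  have hkeys : d.keys.Nodup := pvNodupKeysFoldr _
  apply PySem.List.sorted_eq_of_perm_of_pairwise_lt
  · -- permutation
    have hTnd : ((PySem.Set.ofList flat).map (fun km => (km, (flat.idxOf km : Int)))).Nodup :=
      (PySem.Set.nodup_ofList flat).map (fun a b h => congrArg Prod.fst h)
    have hind : d.items.Nodup := List.Nodup.of_map _ hkeys
    rw [List.perm_ext_iff_of_nodup hTnd hind]
    intro a
    constructor
    · intro ha
      obtain ⟨km, hkm, hEq⟩ := List.mem_map.mp ha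
      have hkmf : km ∈ flat := (PySem.Set.mem_ofList flat km).mp hkm
      have : d.get? km = some (flat.idxOf km : Int) := by
        rw [hd, pvGetFoldr]
        simp [hkmf]
      subst hEq
      exact (PySem.Dict.get?_eq_some_iff_mem_items d km _ hkeys).mp this
    · intro ha
      have hget : d.get? a.1 = some a.2 :=
        (PySem.Dict.get?_eq_some_iff_mem_items d a.1 a.2 hkeys).mpr ha
      rw [hd, pvGetFoldr] at hget
      by_cases hm : a.1 ∈ flat
      · simp only [hm, if_true, zero_add, Option.some.injEq] at hget
        refine List.mem_map.mpr ⟨a.1, (PySem.Set.mem_ofList flat a.1).mpr hm, ?_⟩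
        exact Prod.ext rfl hget
      · simp [hm] at hget
  · -- strictly increasing positions
    refine List.pairwise_map.mpr ?_
    refine List.Pairwise.imp ?_ (pvIdxPairwise flat)
    intro a b h
    show ((flat.idxOf a : Int) < (flat.idxOf b : Int))
    exact_mod_cast h

-- ===== VERDICT (by name: the statement is the Claim_ definition above) =====
theorem create_kmer_dict_spec : Claim_equal_create_kmer_dict := by
  intro sequences k _
  unfold Spec_create_kmer_dict create_kmer_dict create_kmer_dict_alt
  have hfm : ∀ (seq : String) (st : PySem.Dict String Int × Int),
      (PySem.List.pyRange 0 (PySem.Str.len seq - k + 1) 1).foldl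
        (fun st i =>
          let kmer := PySem.Str.slice seq (some i) (some (i + k))
          if st.1.contains kmer then st else (st.1.insert kmer st.2, st.2 + 1))
        st
      = ((PySem.List.pyRange 0 (PySem.Str.len seq - k + 1) 1).map
          (fun i => PySem.Str.slice seq (some i) (some (i + k)))).foldl
        (fun st kmer => if st.1.contains kmer then st else (st.1.insert kmer st.2, st.2 + 1))
        st := by
    intro seq st; rw [List.foldl_map]
  simp only [hfm]
  rw [← List.foldl_flatMap]
  set flat := sequences.flatMap (fun seq =>
    (PySem.List.pyRange 0 (PySem.Str.len seq - k + 1) 1).map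
      (fun i => PySem.Str.slice seq (some i) (some (i + k)))) with hflat
  -- B's side: reverse foldl is foldr, then the sorted-first-positions characterization
  rw [List.foldl_reverse, pvSorted flat, pvEnumMap]
  -- A's side collapses to the enumerated dedup list
  conv_lhs => rw [show (PySem.Dict.empty : PySem.Dict String Int) = pvMkD [] from rfl,
    show (0 : Int) = (([] : List String).length : Int) from rfl, pvFold]
  rw [← PySem.Set.ofList_eq_foldl]
  rfl
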